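-- pv_equiv track=rewrite | github.com/jahnaviichauhan/Python | assignment/fibevensum.py | fibonacci_sum_even
-- ===== SOURCE A (Python) =====
-- def fibonacci_sum_even(n):
--     fibonacci_sequence = [0, 1]
--     sum_even = 0
--
--     while len(fibonacci_sequence) < n:
--         next_term = fibonacci_sequence[-1] + fibonacci_sequence[-2]
--         fibonacci_sequence.append(next_term)
--         if next_term % 2 == 0:
--             sum_even += next_term
--
--     return fibonacci_sequence, sum_even
-- ===== SOURCE B (Python) =====
-- def fibonacci_sum_even(n):
--     # Generate the sequence with a running pair (no negative indexing),
--     # then sum the even terms using the fact that Fibonacci parity has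
--     # period 3: the even terms sit exactly at indices 0, 3, 6, ...
--     # (index 0 holds 0, so including it never changes the sum).
--     seq = []
--     a, b = 0, 1
--     for _ in range(max(2, n)):
--         seq.append(a)
--         a, b = b, a + b
--     return seq, sum(x for i, x in enumerate(seq) if i % 3 == 0)
-- ===== Notes on version B (the rewrite author's own statement) =====
-- stated objective: alternative
-- what changed: B generates the sequence with a running (a, b) pair in a for-loop (no negative indexing into the list) and computes the even-sum in a separate pass using the period-3 parity of Fibonacci numbers (even terms sit exactly at indices 0, 3, 6, ...), instead of testing each appended term's parity inside the while-loop.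
import Mathlib
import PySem

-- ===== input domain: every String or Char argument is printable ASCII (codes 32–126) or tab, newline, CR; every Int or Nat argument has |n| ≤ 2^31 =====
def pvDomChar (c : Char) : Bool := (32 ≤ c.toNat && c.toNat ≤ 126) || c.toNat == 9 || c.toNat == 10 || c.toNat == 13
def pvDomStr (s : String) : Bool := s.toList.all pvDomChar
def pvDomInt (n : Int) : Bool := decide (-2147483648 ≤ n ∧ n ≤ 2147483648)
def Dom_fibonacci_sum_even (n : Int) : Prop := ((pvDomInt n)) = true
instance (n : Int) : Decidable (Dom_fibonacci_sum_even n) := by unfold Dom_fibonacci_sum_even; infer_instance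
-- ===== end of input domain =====

-- B regenerates the sequence with a running pair and sums the even terms by the
-- period-3 parity of Fibonacci (indices 0, 3, 6, …) instead of testing parity
-- of each appended term inside the generating loop (objective: alternative).

-- ===== PORT A =====
-- while-loop as fuel recursion; fuel n.toNat suffices because the length starts
-- at 2 and grows by 1 each iteration.  The `.getD 0` on pyGet? is never hit:
-- the list always has ≥ 2 elements, so both negative indexings are in range.
def fibLoopA (n : Int) : Nat → List Int → Int → List Int × Int
  | 0, seq, s => (seq, s)
  | fuel+1, seq, s =>
    if (seq.length : Int) < n then
      let next := (PySem.List.pyGet? seq (-1)).getD 0 + (PySem.List.pyGet? seq (-2)).getD 0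
      fibLoopA n fuel (seq ++ [next]) (if next % 2 == 0 then s + next else s)
    else (seq, s)

def fibonacci_sum_even (n : Int) : List Int × Int :=
  fibLoopA n n.toNat [0, 1] 0

-- ===== PORT B =====
def fibStepB (st : List Int × Int × Int) (_ : Int) : List Int × Int × Int :=
  (st.1 ++ [st.2.1], st.2.2, st.2.1 + st.2.2)

def fibonacci_sum_even_alt (n : Int) : List Int × Int :=
  let st := (PySem.List.pyRange 0 (max 2 n) 1).foldl fibStepB ([], 0, 1)
  (st.1, (PySem.List.enumerate st.1).foldl
    (fun acc p => if p.1 % 3 == 0 then acc + p.2 else acc) 0)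

-- ===== PRECONDITION & SPEC =====
def Spec_fibonacci_sum_even (n : Int) (out : List Int × Int) : Prop := out = fibonacci_sum_even_alt n
instance (n : Int) (out : List Int × Int) : Decidable (Spec_fibonacci_sum_even n out) := by unfold Spec_fibonacci_sum_even; infer_instance

-- ===== CLAIM (what is proved, stated in full; the proofs are below) =====
def Claim_equal_fibonacci_sum_even : Prop := ∀ (n : Int), Dom_fibonacci_sum_even n → Spec_fibonacci_sum_even n (fibonacci_sum_even n)

-- ===== LEMMAS AND PROOFS =====

-- reference Fibonacci function, prefix list, and even-fib partial sum
def fib : Nat → Int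
  | 0 => 0
  | 1 => 1
  | k+2 => fib k + fib (k+1)

def fibs (m : Nat) : List Int := (List.range m).map fun i => fib i

def G : Nat → Int
  | 0 => 0
  | m+1 => G m + if m % 3 = 0 then fib m else 0

theorem length_fibs (m : Nat) : (fibs m).length = m := by simp [fibs]

theorem fibs_succ (m : Nat) : fibs (m+1) = fibs m ++ [fib m] := by
  simp [fibs, List.range_succ]

theorem getElem?_fibs {m k : Nat} (h : k < m) : (fibs m)[k]? = some (fib k) := by
  simp [fibs, h]

theorem fib_mod2 (k : Nat) : fib k % 2 = if k % 3 = 0 then 0 else 1 := by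
  induction k using Nat.strong_induction_on with
  | _ k ih =>
    match k with
    | 0 => simp [fib]
    | 1 => simp [fib]
    | (k+2) =>
      have h1 := ih k (by omega)
      have h2 := ih (k+1) (by omega)
      show (fib k + fib (k+1)) % 2 = _
      have hk : k % 3 = 0 ∨ k % 3 = 1 ∨ k % 3 = 2 := by omega
      rcases hk with h | h | h <;>
        · rw [h] at h1
          rw [show (k+1) % 3 = (k % 3 + 1) % 3 by omega, h] at h2
          rw [show (k+2) % 3 = (k % 3 + 2) % 3 by omega, h]
          simp at h1 h2 ⊢
          omega

-- A's loop, started on a Fibonacci prefix of length L ≥ 2, extends it to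
-- length max L n.toNat and adds the even terms it appends, i.e. G M - G L.
theorem loopA_inv (n : Int) : ∀ (f : Nat), ∀ (L : Nat) (s : Int), 2 ≤ L → n ≤ (L : Int) + f →
    fibLoopA n f (fibs L) s = (fibs (max L n.toNat), s + (G (max L n.toNat) - G L)) := by
  intro f
  induction f with
  | zero =>
    intro L s hL hn
    have hM : max L n.toNat = L := by omega
    simp [fibLoopA, hM]
  | succ f ih =>
    intro L s hL hn
    by_cases h : (L : Int) < n
    · have hlen : ((fibs L).length : Int) < n := by rw [length_fibs]; exact h
      have hsplit : fibs L = fibs (L-1) ++ [fib (L-1)] := by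
        have := fibs_succ (L-1); rw [show L-1+1 = L by omega] at this; exact this
      have hget1 : (PySem.List.pyGet? (fibs L) (-1)).getD 0 = fib (L-1) := by
        rw [hsplit, PySem.List.pyGet?_neg_one_append_singleton]; rfl
      have hget2 : (PySem.List.pyGet? (fibs L) (-2)).getD 0 = fib (L-2) := by
        rw [PySem.List.pyGet?_neg_ofNat (fibs L) 2 (by omega) (by rw [length_fibs]; omega)]
        rw [length_fibs, getElem?_fibs (by omega)]; rfl
      have hfib : fib (L-1) + fib (L-2) = fib L := by
        have : fib (L-2+2) = fib (L-2) + fib (L-2+1) := by simp [fib]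
        rw [show L-2+2 = L by omega, show L-2+1 = L-1 by omega] at this
        omega
      have hcond : ((fib L % 2 == 0) = true) ↔ L % 3 = 0 := by
        rw [beq_iff_eq, fib_mod2 L]; split <;> simp_all
      unfold fibLoopA
      rw [if_pos hlen]
      simp only [hget1, hget2, hfib]
      rw [show fibs L ++ [fib L] = fibs (L+1) from (fibs_succ L).symm]
      rw [ih (L+1) _ (by omega) (by push_cast; omega)]
      have hM : max (L+1) n.toNat = max L n.toNat := by omega
      rw [hM]
      refine Prod.ext rfl ?_
      show (if fib L % 2 == 0 then s + fib L else s) + (G (max L n.toNat) - G (L+1)) = _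
      have hG : G (L+1) = G L + if L % 3 = 0 then fib L else 0 := rfl
      by_cases hp : L % 3 = 0
      · rw [if_pos (hcond.mpr hp), hG, if_pos hp]; ring
      · rw [if_neg (by simp [hcond, hp]), hG, if_neg hp]; ring
    · have hlen : ¬ ((fibs L).length : Int) < n := by rw [length_fibs]; exact h
      have hM : max L n.toNat = L := by omega
      unfold fibLoopA
      rw [if_neg hlen, hM]
      simp

-- B's generating loop ignores the range element; count the iterations
def iterB : Nat → List Int × Int × Int → List Int × Int × Int
  | 0, st => st
  | k+1, st => iterB k (fibStepB st 0)

theorem foldl_eq_iterB : ∀ (l : List Int) (st : List Int × Int × Int),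
    l.foldl fibStepB st = iterB l.length st := by
  intro l
  induction l with
  | nil => intro st; rfl
  | cons x l ih => intro st; simp only [List.foldl_cons, List.length_cons]; exact ih _

theorem iterB_succ (m : Nat) : ∀ st, iterB (m+1) st = fibStepB (iterB m st) 0 := by
  induction m with
  | zero => intro st; rfl
  | succ m ih => intro st; exact ih (fibStepB st 0)

theorem iterB_inv (m : Nat) : iterB m ([], 0, 1) = (fibs m, fib m, fib (m+1)) := by
  induction m with
  | zero => simp [iterB, fibs, fib]
  | succ m ih =>
    rw [iterB_succ, ih]
    refine Prod.ext ?_ (Prod.ext rfl ?_)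
    · show fibs m ++ [fib m] = fibs (m+1); exact (fibs_succ m).symm
    · show fib m + fib (m+1) = fib (m+2); simp [fib]

theorem enum_sum (m : Nat) :
    (PySem.List.enumerate (fibs m)).foldl
      (fun acc p => if p.1 % 3 == 0 then acc + p.2 else acc) 0 = G m := by
  suffices h : ∀ (m : Nat) (acc : Int),
      (PySem.List.enumerate (fibs m)).foldl
        (fun acc p => if p.1 % 3 == 0 then acc + p.2 else acc) acc = acc + G m by
    rw [h]; ring
  intro m
  induction m with
  | zero => intro acc; simp [fibs, PySem.List.enumerate_nil, G]
  | succ m ih =>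
    intro acc
    rw [fibs_succ, PySem.List.enumerate_append, List.foldl_append, ih]
    simp only [length_fibs, PySem.List.enumerate_cons, PySem.List.enumerate_nil,
      List.foldl_cons, List.foldl_nil, zero_add]
    have hmod : (((m : Int) % 3 == 0) = true) ↔ m % 3 = 0 := by
      rw [beq_iff_eq]; omega
    have hG : G (m+1) = G m + if m % 3 = 0 then fib m else 0 := rfl
    by_cases hp : m % 3 = 0
    · rw [if_pos (hmod.mpr hp), hG, if_pos hp]; ring
    · rw [if_neg (by simp [hmod, hp]), hG, if_neg hp]; ring

theorem G_two : G 2 = 0 := by simp [G, fib]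

theorem portA_eq (n : Int) : fibonacci_sum_even n = (fibs (max 2 n.toNat), G (max 2 n.toNat)) := by
  have h2 : ([0, 1] : List Int) = fibs 2 := by decide
  unfold fibonacci_sum_even
  rw [h2, loopA_inv n n.toNat 2 0 (by omega) (by omega)]
  rw [G_two]
  ring_nf

theorem portB_eq (n : Int) : fibonacci_sum_even_alt n = (fibs (max 2 n.toNat), G (max 2 n.toNat)) := by
  unfold fibonacci_sum_even_alt
  rw [foldl_eq_iterB]
  have hlen : (PySem.List.pyRange 0 (max 2 n) 1).length = max 2 n.toNat := by
    rw [PySem.List.length_pyRange_one]; omega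
  rw [hlen, iterB_inv]
  simp only
  rw [enum_sum]

-- ===== VERDICT (by name: the statement is the Claim_ definition above) =====
theorem fibonacci_sum_even_spec : Claim_equal_fibonacci_sum_even := by
  intro n _
  unfold Spec_fibonacci_sum_even
  rw [portA_eq, portB_eq]
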